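-- pv_equiv track=rewrite | github.com/eai-dk/Yellow-card-model-epl | squad_validator.py | team_in_fixture
-- ===== SOURCE A (Python) =====
-- import unicodedata
--
-- TEAM_ALIASES = {
--     "Manchester City": ["manchester city", "man city", "man. city"],
--     "Manchester United": ["manchester united", "man united", "man utd", "man. united"],
--     "Newcastle": ["newcastle", "newcastle united"],
--     "Tottenham": ["tottenham", "tottenham hotspur", "spurs"],
--     "Wolves": ["wolves", "wolverhampton", "wolverhampton wanderers"],
--     "Brighton": ["brighton", "brighton & hove albion", "brighton and hove albion"],
--     "Nottingham Forest": ["nottingham forest", "nott'm forest", "nottm forest"],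
--     "West Ham": ["west ham", "west ham united"],
--     "Crystal Palace": ["crystal palace"],
--     "Aston Villa": ["aston villa"],
--     "Leicester": ["leicester", "leicester city"],
--     "Bournemouth": ["bournemouth", "afc bournemouth"],
--     "Fulham": ["fulham"],
--     "Everton": ["everton"],
--     "Liverpool": ["liverpool"],
--     "Arsenal": ["arsenal"],
--     "Chelsea": ["chelsea"],
--     "Ipswich": ["ipswich", "ipswich town"],
--     "Sunderland": ["sunderland"],
--     "Burnley": ["burnley"],
--     "Leeds": ["leeds", "leeds united"],
--     "Sheffield Utd": ["sheffield utd", "sheffield united", "sheffield"],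
--     "Southampton": ["southampton"],
-- }
--
-- def normalize_name(name: str) -> str:
--     if not name:
--         return ""
--     name = unicodedata.normalize("NFKD", name).encode("ASCII", "ignore").decode("ASCII")
--     return name.lower().strip()
--
-- def team_in_fixture(team_name: str, fixture_str: str) -> bool:
--     """Check if team_name matches any part of the fixture string."""
--     if not team_name or not fixture_str:
--         return False
--     fixture_lower = fixture_str.lower()
--     team_lower = team_name.lower()
--
--     # Direct check
--     if team_lower in fixture_lower:
--         return True
--
--     # Check aliases
--     for canonical, aliases in TEAM_ALIASES.items():
--         if normalize_name(canonical) == normalize_name(team_name) or normalize_name(team_name) in [normalize_name(a) for a in aliases]: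
--             for alias in aliases:
--                 if alias in fixture_lower:
--                     return True
--             if normalize_name(canonical) in fixture_lower:
--                 return True
--     return False
-- ===== SOURCE B (Python) =====
-- TEAM_ALIASES = {
--     "Manchester City": ["manchester city", "man city", "man. city"],
--     "Manchester United": ["manchester united", "man united", "man utd", "man. united"],
--     "Newcastle": ["newcastle", "newcastle united"],
--     "Tottenham": ["tottenham", "tottenham hotspur", "spurs"],
--     "Wolves": ["wolves", "wolverhampton", "wolverhampton wanderers"],
--     "Brighton": ["brighton", "brighton & hove albion", "brighton and hove albion"],
--     "Nottingham Forest": ["nottingham forest", "nott'm forest", "nottm forest"],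
--     "West Ham": ["west ham", "west ham united"],
--     "Crystal Palace": ["crystal palace"],
--     "Aston Villa": ["aston villa"],
--     "Leicester": ["leicester", "leicester city"],
--     "Bournemouth": ["bournemouth", "afc bournemouth"],
--     "Fulham": ["fulham"],
--     "Everton": ["everton"],
--     "Liverpool": ["liverpool"],
--     "Arsenal": ["arsenal"],
--     "Chelsea": ["chelsea"],
--     "Ipswich": ["ipswich", "ipswich town"],
--     "Sunderland": ["sunderland"],
--     "Burnley": ["burnley"],
--     "Leeds": ["leeds", "leeds united"],
--     "Sheffield Utd": ["sheffield utd", "sheffield united", "sheffield"],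
--     "Southampton": ["southampton"],
-- }
--
-- import unicodedata
--
-- def normalize_name(name: str) -> str:
--     if not name:
--         return ""
--     name = unicodedata.normalize("NFKD", name).encode("ASCII", "ignore").decode("ASCII")
--     return name.lower().strip()
--
-- def _build_index():
--     pairs = []
--     for canonical, aliases in TEAM_ALIASES.items():
--         checks = aliases + [normalize_name(canonical)]
--         keys = list(dict.fromkeys([normalize_name(canonical)] + [normalize_name(a) for a in aliases]))
--         pairs.extend((k, checks) for k in keys)
--     idx = {}
--     for k, cs in pairs:
--         idx[k] = idx.get(k, []) + [cs]
--     return idx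
--
-- _INDEX = _build_index()
--
-- def team_in_fixture(team_name: str, fixture_str: str) -> bool:
--     """Check if team_name matches any part of the fixture string."""
--     if not team_name or not fixture_str:
--         return False
--     fixture_lower = fixture_str.lower()
--     if team_name.lower() in fixture_lower:
--         return True
--     for checks in _INDEX.get(normalize_name(team_name), []):
--         if any(s in fixture_lower for s in checks):
--             return True
--     return False
-- ===== Notes on version B (the rewrite author's own statement) =====
-- stated objective: faster
-- what changed: B precomputes once, at module load, a reverse index mapping every normalized team/alias name to its group's check strings, so each call does one dict lookup and a flat substring pass instead of A's per-call scan over all 23 alias groups that re-normalizes every canonical name and alias on every call.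
import Mathlib
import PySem

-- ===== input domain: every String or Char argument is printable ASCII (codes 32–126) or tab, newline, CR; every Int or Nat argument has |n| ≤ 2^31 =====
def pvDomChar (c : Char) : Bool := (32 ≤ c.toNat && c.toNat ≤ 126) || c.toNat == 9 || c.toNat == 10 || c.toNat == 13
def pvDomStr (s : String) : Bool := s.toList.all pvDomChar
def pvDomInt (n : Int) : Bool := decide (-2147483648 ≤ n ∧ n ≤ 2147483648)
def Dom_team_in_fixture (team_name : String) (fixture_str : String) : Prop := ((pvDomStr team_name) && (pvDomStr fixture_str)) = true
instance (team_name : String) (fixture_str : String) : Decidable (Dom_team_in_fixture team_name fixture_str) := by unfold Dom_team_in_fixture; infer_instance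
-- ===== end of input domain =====

-- B builds, once, a reverse index from each normalized team/alias name to the matching groups'
-- check strings; each call is then one dict lookup plus a flat substring pass, instead of A's
-- per-call scan over all alias groups that re-normalizes every canonical name and alias.

-- ===== PORT A =====
def TEAM_ALIASES : List (String × List String) := [
  ("Manchester City", ["manchester city", "man city", "man. city"]),
  ("Manchester United", ["manchester united", "man united", "man utd", "man. united"]),
  ("Newcastle", ["newcastle", "newcastle united"]),
  ("Tottenham", ["tottenham", "tottenham hotspur", "spurs"]),
  ("Wolves", ["wolves", "wolverhampton", "wolverhampton wanderers"]),
  ("Brighton", ["brighton", "brighton & hove albion", "brighton and hove albion"]),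
  ("Nottingham Forest", ["nottingham forest", "nott'm forest", "nottm forest"]),
  ("West Ham", ["west ham", "west ham united"]),
  ("Crystal Palace", ["crystal palace"]),
  ("Aston Villa", ["aston villa"]),
  ("Leicester", ["leicester", "leicester city"]),
  ("Bournemouth", ["bournemouth", "afc bournemouth"]),
  ("Fulham", ["fulham"]),
  ("Everton", ["everton"]),
  ("Liverpool", ["liverpool"]),
  ("Arsenal", ["arsenal"]),
  ("Chelsea", ["chelsea"]),
  ("Ipswich", ["ipswich", "ipswich town"]),
  ("Sunderland", ["sunderland"]),
  ("Burnley", ["burnley"]),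
  ("Leeds", ["leeds", "leeds united"]),
  ("Sheffield Utd", ["sheffield utd", "sheffield united", "sheffield"]),
  ("Southampton", ["southampton"])]

-- normalize_name: unicodedata.NFKD + ASCII-encode/decode is the identity on the ASCII domain
-- (Dom_: printable ASCII plus tab/newline/CR), so only lower().strip() remains; exact on Dom_.
def normalize_name (name : String) : String :=
  if name == "" then "" else PySem.Str.strip (PySem.Str.lower name)

-- the 'for canonical, aliases in TEAM_ALIASES.items():' loop with its early returns
def aliasLoop (table : List (String × List String)) (team_name : String) (fixture_lower : String) : Bool :=
  match table with
  | [] => false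
  | (canonical, aliases) :: rest =>
    if normalize_name canonical == normalize_name team_name
        || (aliases.map normalize_name).contains (normalize_name team_name) then
      if aliases.any (fun al => PySem.Str.isIn al fixture_lower) then true
      else if PySem.Str.isIn (normalize_name canonical) fixture_lower then true
      else aliasLoop rest team_name fixture_lower
    else aliasLoop rest team_name fixture_lower

def team_in_fixture (team_name : String) (fixture_str : String) : Bool :=
  if team_name == "" || fixture_str == "" then false
  else
    let fixture_lower := PySem.Str.lower fixture_str
    let team_lower := PySem.Str.lower team_name
    if PySem.Str.isIn team_lower fixture_lower then true
    else aliasLoop TEAM_ALIASES team_name fixture_lower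

-- ===== PORT B =====
-- _build_index: flat (key, checks) pairs, then merged into a dict (idx[k] = idx.get(k, []) + [cs])
def pvPairs : List (String × List String) :=
  TEAM_ALIASES.flatMap (fun g =>
    (PySem.List.dedup (normalize_name g.1 :: g.2.map normalize_name)).map
      (fun k => (k, g.2 ++ [normalize_name g.1])))

def pvIndex : PySem.Dict String (List (List String)) :=
  pvPairs.foldl (fun d p => d.modify p.1 [] (· ++ [p.2])) PySem.Dict.empty

def team_in_fixture_alt (team_name : String) (fixture_str : String) : Bool :=
  if team_name == "" || fixture_str == "" then false
  else
    let fixture_lower := PySem.Str.lower fixture_str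
    if PySem.Str.isIn (PySem.Str.lower team_name) fixture_lower then true
    else
      (pvIndex.getD (normalize_name team_name) []).any
        (fun checks => checks.any (fun s => PySem.Str.isIn s fixture_lower))

-- ===== PRECONDITION & SPEC =====
def Spec_team_in_fixture (team_name : String) (fixture_str : String) (out : Bool) : Prop := out = team_in_fixture_alt team_name fixture_str
instance (team_name : String) (fixture_str : String) (out : Bool) : Decidable (Spec_team_in_fixture team_name fixture_str out) := by unfold Spec_team_in_fixture; infer_instance

-- ===== CLAIM (what is proved, stated in full; the proofs are below) =====
def Claim_equal_team_in_fixture : Prop := ∀ (team_name : String) (fixture_str : String), Dom_team_in_fixture team_name fixture_str → Spec_team_in_fixture team_name fixture_str (team_in_fixture team_name fixture_str)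

-- ===== LEMMAS AND PROOFS =====

-- B's lookup in the merged dict is the filtered pair list (cites PySem.Dict.getD_foldl_modify_append)
theorem getD_pvIndex (k : String) :
    pvIndex.getD k [] = (pvPairs.filter (fun p => p.1 == k)).map (·.2) := by
  simp [pvIndex, PySem.Dict.getD_foldl_modify_append]

-- the group-local part: filtered pairs of one group, flattened through any
theorem group_any (ks : List String) (cs : List String) (k : String) (hit : String → Bool) :
    (((ks.map (fun x => (x, cs))).filter (fun p => p.1 == k)).map (·.2)).any
        (fun c => c.any hit)
      = (ks.contains k && cs.any hit) := by
  induction ks with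
  | nil => simp
  | cons a t ih =>
    by_cases h : a = k
    · subst h; simp [ih]
    · simp only [List.map_cons, List.filter_cons, List.contains_cons]
      have h1 : (a == k) = false := by simp [h]
      have h2 : (k == a) = false := by simp [Ne.symm h]
      simp [h1, h2, ih]

-- A's loop equals B's filtered-pairs any, for any table
theorem aliasLoop_eq (table : List (String × List String)) (team_name fixture_lower : String) :
    aliasLoop table team_name fixture_lower
      = (((table.flatMap (fun g =>
            (PySem.List.dedup (normalize_name g.1 :: g.2.map normalize_name)).map
              (fun k => (k, g.2 ++ [normalize_name g.1])))).filter
            (fun p => p.1 == normalize_name team_name)).map (·.2)).any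
          (fun checks => checks.any (fun s => PySem.Str.isIn s fixture_lower)) := by
  induction table with
  | nil => simp [aliasLoop]
  | cons g rest ih =>
    obtain ⟨canonical, aliases⟩ := g
    rw [aliasLoop]
    rw [List.flatMap_cons, List.filter_append, List.map_append, List.any_append,
        group_any, ← ih]
    have hmem : (PySem.List.dedup (normalize_name canonical :: aliases.map normalize_name)).contains
          (normalize_name team_name)
        = (normalize_name canonical == normalize_name team_name
            || (aliases.map normalize_name).contains (normalize_name team_name)) := by
      have hsymm : (normalize_name canonical == normalize_name team_name)
          = decide (normalize_name team_name = normalize_name canonical) := by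
        by_cases h : normalize_name canonical = normalize_name team_name
        · simp [h]
        · simp [h, Ne.symm h]
      simp [hsymm]
    rw [hmem]
    by_cases hc : (normalize_name canonical == normalize_name team_name
        || (aliases.map normalize_name).contains (normalize_name team_name)) = true
    · rw [if_pos hc, hc]
      simp only [List.any_append, List.any_cons, List.any_nil, Bool.or_false, Bool.true_and]
      cases h1 : aliases.any (fun al => PySem.Str.isIn al fixture_lower) <;>
        cases h2 : PySem.Str.isIn (normalize_name canonical) fixture_lower <;> rfl
    · rw [if_neg hc]
      simp only [Bool.not_eq_true] at hc
      rw [hc, Bool.false_and, Bool.false_or]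

-- ===== VERDICT (by name: the statement is the Claim_ definition above) =====
theorem team_in_fixture_spec : Claim_equal_team_in_fixture := by
  intro team_name fixture_str _
  unfold Spec_team_in_fixture team_in_fixture team_in_fixture_alt
  by_cases hg : (team_name == "" || fixture_str == "") = true
  · simp [hg]
  · simp only [hg]
    rw [getD_pvIndex]
    simp only [pvPairs]
    rw [← aliasLoop_eq]
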